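-- pv_equiv track=rewrite | github.com/cipherzeroprotocol/sol-lens | solana-lens/scripts/analysis/address_analyzer.py | _summarize_transactions
-- ===== SOURCE A (Python) =====
-- from typing import Dict, List, Any, Optional, Tuple
--
-- def _summarize_transactions(signatures: List[Dict]) -> Dict:
--     """Summarize transaction signatures data."""
--     summary = {
--         "total_transactions": len(signatures),
--         "earliest_transaction": None,
--         "latest_transaction": None,
--         "error_count": 0
--     }
--
--     block_times = []
--
--     for sig in signatures:
--         block_time = sig.get("blockTime")
--         if block_time:
--             block_times.append(block_time)
--
--         if sig.get("err"):
--             summary["error_count"] += 1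
--
--     if block_times:
--         summary["earliest_transaction"] = min(block_times)
--         summary["latest_transaction"] = max(block_times)
--
--     return summary
-- ===== SOURCE B (Python) =====
-- def _summarize_transactions(signatures):
--     """Summarize transaction signatures data (one pass, running aggregates)."""
--     earliest = None
--     latest = None
--     error_count = 0
--
--     for sig in signatures:
--         bt = sig.get("blockTime")
--         if bt:
--             earliest = bt if earliest is None else min(earliest, bt)
--             latest = bt if latest is None else max(latest, bt)
--         if sig.get("err"):
--             error_count += 1
--
--     return {
--         "total_transactions": len(signatures),
--         "earliest_transaction": earliest,
--         "latest_transaction": latest,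
--         "error_count": error_count,
--     }
-- ===== Notes on version B (the rewrite author's own statement) =====
-- stated objective: simpler
-- what changed: B drops the intermediate block_times list and the post-loop min()/max() pass, maintaining earliest/latest/error_count as running scalars in a single pass and building the summary dict once at the end.
import Mathlib
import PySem

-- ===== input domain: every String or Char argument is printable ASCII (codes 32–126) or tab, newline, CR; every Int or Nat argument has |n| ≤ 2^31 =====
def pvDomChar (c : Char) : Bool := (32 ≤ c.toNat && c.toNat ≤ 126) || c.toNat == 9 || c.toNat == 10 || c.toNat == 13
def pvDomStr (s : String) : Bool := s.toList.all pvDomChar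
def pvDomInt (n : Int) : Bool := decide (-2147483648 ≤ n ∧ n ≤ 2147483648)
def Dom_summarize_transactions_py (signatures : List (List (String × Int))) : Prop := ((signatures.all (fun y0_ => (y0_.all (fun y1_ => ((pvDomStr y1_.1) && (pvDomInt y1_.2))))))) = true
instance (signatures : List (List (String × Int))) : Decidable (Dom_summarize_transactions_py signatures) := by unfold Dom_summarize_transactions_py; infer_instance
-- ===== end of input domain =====

-- B replaces A's build-a-block_times-list-then-min/max with a single pass maintaining
-- earliest/latest/error_count as running scalars (objective: simpler, O(1) extra space).

-- sig.get(k): first match in the association list (Python dict lookup)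
def pvSigGet (sig : List (String × Int)) (k : String) : Option Int :=
  (sig.find? (fun p => p.1 == k)).map (·.2)

-- ===== PORT A =====
-- loop body of A: collect truthy blockTimes into a list, count truthy errs
def pvStepA (acc : List Int × Int) (sig : List (String × Int)) : List Int × Int :=
  let bts := match pvSigGet sig "blockTime" with
    | some v => if v ≠ 0 then acc.1 ++ [v] else acc.1
    | none => acc.1
  let errs := match pvSigGet sig "err" with
    | some e => if e ≠ 0 then acc.2 + 1 else acc.2
    | none => acc.2
  (bts, errs)

def summarize_transactions_py (signatures : List (List (String × Int))) : List (String × Option Int) :=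
  let st := signatures.foldl pvStepA ([], 0)
  let earliest := if st.1 ≠ [] then PySem.List.min? st.1 (fun y => y) else none
  let latest := if st.1 ≠ [] then PySem.List.max? st.1 (fun y => y) else none
  [("total_transactions", some (signatures.length : Int)),
   ("earliest_transaction", earliest),
   ("latest_transaction", latest),
   ("error_count", some st.2)]

-- ===== PORT B =====
-- loop body of B: running earliest/latest/error_count
def pvStepB (acc : Option Int × Option Int × Int) (sig : List (String × Int)) :
    Option Int × Option Int × Int :=
  let el : Option Int × Option Int := match pvSigGet sig "blockTime" with
    | some v =>
        if v ≠ 0 then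
          ((match acc.1 with | none => some v | some m => some (min m v)),
           (match acc.2.1 with | none => some v | some m => some (max m v)))
        else (acc.1, acc.2.1)
    | none => (acc.1, acc.2.1)
  let c := match pvSigGet sig "err" with
    | some e => if e ≠ 0 then acc.2.2 + 1 else acc.2.2
    | none => acc.2.2
  (el.1, el.2, c)

def summarize_transactions_py_alt (signatures : List (List (String × Int))) : List (String × Option Int) :=
  let st := signatures.foldl pvStepB (none, none, 0)
  [("total_transactions", some (signatures.length : Int)),
   ("earliest_transaction", st.1),
   ("latest_transaction", st.2.1),
   ("error_count", some st.2.2)]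

-- ===== PRECONDITION & SPEC =====
def Spec_summarize_transactions_py (signatures : List (List (String × Int))) (out : List (String × Option Int)) : Prop := out = summarize_transactions_py_alt signatures
instance (signatures : List (List (String × Int))) (out : List (String × Option Int)) : Decidable (Spec_summarize_transactions_py signatures out) := by unfold Spec_summarize_transactions_py; infer_instance

-- ===== CLAIM (what is proved, stated in full; the proofs are below) =====
def Claim_equal_summarize_transactions_py : Prop := ∀ (signatures : List (List (String × Int))), Dom_summarize_transactions_py signatures → Spec_summarize_transactions_py signatures (summarize_transactions_py signatures)

-- ===== LEMMAS AND PROOFS =====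

-- running min/max of a list, as an Option (none on [])
def pvOptMin : List Int → Option Int
  | [] => none
  | x :: t => some (t.foldl min x)

def pvOptMax : List Int → Option Int
  | [] => none
  | x :: t => some (t.foldl max x)

theorem pvOptMin_snoc (l : List Int) (v : Int) :
    pvOptMin (l ++ [v]) = some (match pvOptMin l with | none => v | some m => min m v) := by
  cases l with
  | nil => simp [pvOptMin]
  | cons x t => simp [pvOptMin, List.foldl_append]

theorem pvOptMax_snoc (l : List Int) (v : Int) :
    pvOptMax (l ++ [v]) = some (match pvOptMax l with | none => v | some m => max m v) := by
  cases l with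
  | nil => simp [pvOptMax]
  | cons x t => simp [pvOptMax, List.foldl_append]

-- the loop invariant: B's running state is (min, max, count) of A's state
theorem pv_loop_inv (sigs : List (List (String × Int))) :
    ∀ (bts : List Int) (errs : Int),
      sigs.foldl pvStepB (pvOptMin bts, pvOptMax bts, errs)
        = (pvOptMin (sigs.foldl pvStepA (bts, errs)).1,
           pvOptMax (sigs.foldl pvStepA (bts, errs)).1,
           (sigs.foldl pvStepA (bts, errs)).2) := by
  induction sigs with
  | nil => intro bts errs; simp
  | cons sig rest ih =>
    intro bts errs
    have hstep : pvStepB (pvOptMin bts, pvOptMax bts, errs) sig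
        = (pvOptMin (pvStepA (bts, errs) sig).1,
           pvOptMax (pvStepA (bts, errs) sig).1,
           (pvStepA (bts, errs) sig).2) := by
      unfold pvStepA pvStepB
      cases hbt : pvSigGet sig "blockTime" with
      | none => simp
      | some v =>
        by_cases hv : v = 0
        · simp [hv]
        · simp only [hv, pvOptMin_snoc, pvOptMax_snoc, ne_eq, not_false_eq_true, if_true]
          cases pvOptMin bts <;> cases pvOptMax bts <;> simp
    simp only [List.foldl_cons, hstep]
    exact ih _ _
  
theorem pv_min?_eq (l : List Int) :
    (if l ≠ [] then PySem.List.min? l (fun y => y) else none) = pvOptMin l := by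
  cases l with
  | nil => simp [pvOptMin]
  | cons x t => simp [pvOptMin, PySem.List.min?_id_cons]

theorem pv_max?_eq (l : List Int) :
    (if l ≠ [] then PySem.List.max? l (fun y => y) else none) = pvOptMax l := by
  cases l with
  | nil => simp [pvOptMax]
  | cons x t => simp [pvOptMax, PySem.List.max?_id_cons]

-- ===== VERDICT (by name: the statement is the Claim_ definition above) =====
theorem summarize_transactions_py_spec : Claim_equal_summarize_transactions_py := by
  intro signatures _
  unfold Spec_summarize_transactions_py summarize_transactions_py summarize_transactions_py_alt
  have h := pv_loop_inv signatures [] 0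
  simp only [pvOptMin, pvOptMax] at h
  simp only [h, pv_min?_eq, pv_max?_eq, pvOptMin, pvOptMax]
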